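-- pv_equiv track=rewrite | github.com/yoann-dufresne/GraPaTo | propagate.py | propagate
-- ===== SOURCE A (Python) =====
-- def propagate(graph, annotations):
--     # Create dictionaries for unanotated nodes
--     new_annotations = {}
--     already_seen = {}
--     for node in graph:
--         if node not in annotations:
--             new_annotations[node] = set()
--             already_seen[node] = False
--
--     # Walk
--     for node in already_seen:
--         if already_seen[node]:
--             continue
--         local_nodes, local_annotations = breadth_first_search(node, graph, annotations, already_seen)
--         for new_node in local_nodes:
--             new_annotations[new_node] = local_annotations
--
--     return new_annotations
--
-- def breadth_first_search(node, graph, annotations, already_seen):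
--     stack = [node]
--
--     local_annotations = set()
--     local_nodes = set()
--
--     while len(stack) > 0:
--         current_node = stack.pop()
--         already_seen[current_node] = True
--         local_nodes.add(current_node)
--
--         for neighbor in graph[current_node]:
--             # Is it annotated ?
--             if neighbor in annotations:
--                 local_annotations.add(annotations[neighbor])
--             # Previously seen ?
--             elif not already_seen[neighbor]:
--                 stack.append(neighbor)
--
--     return local_nodes, local_annotations
-- ===== SOURCE B (Python) =====
-- def propagate(graph, annotations):
--     # Create dictionaries for unannotated nodes
--     new_annotations = {}
--     already_seen = {}
--     for node in graph:
--         if node not in annotations: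
--             new_annotations[node] = set()
--             already_seen[node] = False
--
--     # Walk: one recursive depth-first traversal per still-unseen component
--     for node in already_seen:
--         if already_seen[node]:
--             continue
--         local_nodes = set()
--         local_annotations = set()
--         depth_first_search(node, graph, annotations, already_seen,
--                            local_nodes, local_annotations)
--         for new_node in local_nodes:
--             new_annotations[new_node] = local_annotations
--
--     return new_annotations
--
-- def depth_first_search(node, graph, annotations, already_seen,
--                        local_nodes, local_annotations):
--     # Mark the node on entry, collect its annotated neighbors, then
--     # recurse into the not-yet-seen unannotated ones (last neighbor first).
--     already_seen[node] = True
--     local_nodes.add(node)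
--     pending = []
--     for neighbor in graph[node]:
--         if neighbor in annotations:
--             local_annotations.add(annotations[neighbor])
--         else:
--             pending.append(neighbor)
--     for neighbor in reversed(pending):
--         if not already_seen[neighbor]:
--             depth_first_search(neighbor, graph, annotations, already_seen,
--                                local_nodes, local_annotations)
-- ===== Notes on version B (the rewrite author's own statement) =====
-- stated objective: alternative
-- what changed: The explicit-stack traversal with delayed marking (nodes may be pushed and re-scanned several times) is replaced by a recursive depth-first helper that marks each node on entry, collects annotated neighbors in one pass and recurses into unseen unannotated neighbors, accumulating into shared local sets instead of returning them.
import Mathlib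
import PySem

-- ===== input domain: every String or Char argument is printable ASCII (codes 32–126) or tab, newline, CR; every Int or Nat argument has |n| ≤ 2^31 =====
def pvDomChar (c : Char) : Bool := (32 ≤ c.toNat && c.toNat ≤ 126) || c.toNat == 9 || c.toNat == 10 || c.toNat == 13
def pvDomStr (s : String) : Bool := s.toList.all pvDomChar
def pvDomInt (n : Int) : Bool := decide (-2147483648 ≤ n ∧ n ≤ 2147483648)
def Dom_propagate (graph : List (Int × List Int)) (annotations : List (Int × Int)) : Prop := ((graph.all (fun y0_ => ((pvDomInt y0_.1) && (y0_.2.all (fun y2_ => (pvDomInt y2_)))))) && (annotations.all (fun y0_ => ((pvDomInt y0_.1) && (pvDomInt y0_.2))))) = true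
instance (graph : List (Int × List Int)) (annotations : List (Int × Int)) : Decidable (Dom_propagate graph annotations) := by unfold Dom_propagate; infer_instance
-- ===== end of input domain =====

-- B replaces A's explicit-stack component traversal (delayed marking, duplicate pushes)
-- by a recursive depth-first helper that marks each node on entry and recurses into
-- unseen unannotated neighbors (last neighbor first); the outer loop is unchanged.


-- ===== PORT A =====
-- Counting helpers and lemmas used by bfsA's termination measure (cited in decreasing_by).
theorem cntMap_le (k : Int) (l : List (Int × Bool)) :
    ((l.map (fun p => if p.1 = k then (k, true) else p)).filter (fun p => !p.2)).length
      ≤ (l.filter (fun p => !p.2)).length := by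
  induction l with
  | nil => simp
  | cons h t ih =>
    obtain ⟨h1, h2⟩ := h
    by_cases hk : h1 = k <;> cases h2 <;> simp [hk] <;> omega

theorem cntMap_lt (k : Int) (l : List (Int × Bool)) (hm : (k, false) ∈ l) :
    ((l.map (fun p => if p.1 = k then (k, true) else p)).filter (fun p => !p.2)).length
      < (l.filter (fun p => !p.2)).length := by
  induction l with
  | nil => simp at hm
  | cons h t ih =>
    obtain ⟨h1, h2⟩ := h
    rcases List.mem_cons.mp hm with he | hm'
    · cases he
      have := cntMap_le k t
      simp
      omega
    · have := ih hm'
      by_cases hk : h1 = k <;> cases h2 <;> simp [hk] <;> omega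

def falseCnt (d : PySem.Dict Int Bool) : Nat :=
  ((PySem.Dict.items d).filter (fun p => p.2 == false)).length

theorem get?_false_of_getD_false (d : PySem.Dict Int Bool) (k : Int)
    (h : PySem.Dict.getD d k true = false) : PySem.Dict.get? d k = some false := by
  rw [PySem.Dict.getD_eq_get?_getD] at h
  cases hg : PySem.Dict.get? d k with
  | none => rw [hg] at h; simp at h
  | some b => rw [hg] at h; simp at h; rw [h]

theorem contains_of_getD_false (d : PySem.Dict Int Bool) (k : Int)
    (h : PySem.Dict.getD d k true = false) : PySem.Dict.contains d k = true := by
  rw [PySem.Dict.contains_eq_isSome_get?, get?_false_of_getD_false d k h]; rfl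

theorem falseCnt_insert_le (d : PySem.Dict Int Bool) (k : Int) :
    falseCnt (PySem.Dict.insert d k true) ≤ falseCnt d := by
  unfold falseCnt
  rw [PySem.Dict.items_insert]
  split
  · have := cntMap_le k (PySem.Dict.items d)
    simpa using this
  · simp

theorem falseCnt_insert_lt (d : PySem.Dict Int Bool) (k : Int)
    (h : PySem.Dict.getD d k true = false) :
    falseCnt (PySem.Dict.insert d k true) < falseCnt d := by
  unfold falseCnt
  rw [PySem.Dict.items_insert, if_pos (contains_of_getD_false d k h)]
  have hm : (k, false) ∈ PySem.Dict.items d := by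
    apply PySem.Dict.mem_items_of_get?_eq_some
    exact get?_false_of_getD_false d k h
  have := cntMap_lt k (PySem.Dict.items d) hm
  simpa using this

theorem getD_insert_true_eq (d : PySem.Dict Int Bool) (k : Int)
    (h : PySem.Dict.getD d k true = true) (x : Int) :
    PySem.Dict.getD (PySem.Dict.insert d k true) x true = PySem.Dict.getD d x true := by
  rw [PySem.Dict.getD_insert]
  split
  · next he => rw [he, h]
  · rfl

def scanA (annotations : PySem.Dict Int Int) (seen : PySem.Dict Int Bool)
    (nbrs : List Int) (acc : PySem.Set Int × List Int) : PySem.Set Int × List Int :=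
  nbrs.foldl (fun p n =>
    match PySem.Dict.get? annotations n with
    | some v => (PySem.Set.add p.1 v, p.2)
    | none => if PySem.Dict.getD seen n true then p else (p.1, p.2 ++ [n])) acc

theorem scanA_push_mem (annotations : PySem.Dict Int Int) (seen : PySem.Dict Int Bool)
    (nbrs : List Int) : ∀ acc n, n ∈ (scanA annotations seen nbrs acc).2 →
    n ∈ acc.2 ∨ PySem.Dict.getD seen n true = false := by
  induction nbrs with
  | nil => intro acc n hn; exact Or.inl hn
  | cons m rest ih =>
    intro acc n hn
    simp only [scanA, List.foldl_cons] at hn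
    cases hg : PySem.Dict.get? annotations m with
    | some v =>
      rcases ih _ n (by simpa [scanA, hg] using hn) with h | h
      · exact Or.inl h
      · exact Or.inr h
    | none =>
      by_cases hs : PySem.Dict.getD seen m true
      · rcases ih _ n (by simpa [scanA, hg, hs] using hn) with h | h
        · exact Or.inl h
        · exact Or.inr h
      · rcases ih _ n (by simpa [scanA, hg, hs] using hn) with h | h
        · rcases List.mem_append.mp h with h' | h'
          · exact Or.inl h'
          · simp at h'; subst h'; exact Or.inr (by simpa using hs)
        · exact Or.inr h

theorem trueCnt_step (stack : List Int) (seen : PySem.Dict Int Bool) (h : stack ≠ [])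
    (push : List Int)
    (hc : PySem.Dict.getD seen (stack.getLast h) true = true)
    (hp : ∀ n ∈ push, PySem.Dict.getD (PySem.Dict.insert seen (stack.getLast h) true) n true = false) :
    ((stack.dropLast ++ push).filter
        (fun x => PySem.Dict.getD (PySem.Dict.insert seen (stack.getLast h) true) x true)).length
      < (stack.filter (fun x => PySem.Dict.getD seen x true)).length := by
  have hpt : ∀ x, PySem.Dict.getD (PySem.Dict.insert seen (stack.getLast h) true) x true
      = PySem.Dict.getD seen x true := getD_insert_true_eq seen _ hc
  simp only [hpt, List.filter_append]
  have hpe : push.filter (fun x => PySem.Dict.getD seen x true) = [] := by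
    rw [List.filter_eq_nil_iff]
    intro n hn
    have := hp n hn; rw [hpt] at this; simp [this]
  rw [hpe]
  conv_rhs => rw [← List.dropLast_append_getLast h]
  simp [List.filter_append, hc]

def trueCnt (stack : List Int) (d : PySem.Dict Int Bool) : Nat :=
  (stack.filter (fun x => PySem.Dict.getD d x true)).length


theorem step_dec (annotations : PySem.Dict Int Int) (nbrs : List Int)
    (stack : List Int) (seen : PySem.Dict Int Bool) (locA : PySem.Set Int) (h : stack ≠ []) :
    Prod.Lex (· < ·) (· < ·)
      (falseCnt (PySem.Dict.insert seen (stack.getLast h) true),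
        trueCnt (stack.dropLast ++
            (scanA annotations (PySem.Dict.insert seen (stack.getLast h) true) nbrs (locA, [])).2)
          (PySem.Dict.insert seen (stack.getLast h) true))
      (falseCnt seen, trueCnt stack seen) := by
  have hpush : ∀ n ∈ (scanA annotations (PySem.Dict.insert seen (stack.getLast h) true)
      nbrs (locA, [])).2,
      PySem.Dict.getD (PySem.Dict.insert seen (stack.getLast h) true) n true = false := by
    intro n hn
    rcases scanA_push_mem _ _ _ _ n hn with h' | h'
    · simp at h'
    · exact h'
  by_cases hc : PySem.Dict.getD seen (stack.getLast h) true
  · rcases Nat.lt_or_ge (falseCnt (PySem.Dict.insert seen (stack.getLast h) true)) (falseCnt seen) with hlt | hge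
    · exact Prod.Lex.left _ _ hlt
    · have heq : falseCnt (PySem.Dict.insert seen (stack.getLast h) true) = falseCnt seen :=
        le_antisymm (falseCnt_insert_le _ _) hge
      rw [heq]
      exact Prod.Lex.right _ (by simpa [trueCnt] using trueCnt_step stack seen h _ hc hpush)
  · exact Prod.Lex.left _ _ (falseCnt_insert_lt seen _ (by simpa using hc))

def bfsA (graph : PySem.Dict Int (List Int)) (annotations : PySem.Dict Int Int)
    (stack : List Int) (seen : PySem.Dict Int Bool) (locN locA : PySem.Set Int) :
    PySem.Set Int × PySem.Set Int × PySem.Dict Int Bool :=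
  if h : stack = [] then (locN, locA, seen)
  else
    let cur := stack.getLast h
    let seen' := PySem.Dict.insert seen cur true
    let sp := scanA annotations seen' (PySem.Dict.getD graph cur []) (locA, [])
    bfsA graph annotations (stack.dropLast ++ sp.2) seen' (PySem.Set.add locN cur) sp.1
termination_by (falseCnt seen, trueCnt stack seen)
decreasing_by
  exact step_dec annotations (PySem.Dict.getD graph (stack.getLast h) []) stack seen locA h

def propagate (graph : List (Int × List Int)) (annotations : List (Int × Int)) : List (Int × List Int) :=
  let g : PySem.Dict Int (List Int) := PySem.Dict.mk graph
  let ann : PySem.Dict Int Int := PySem.Dict.mk annotations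
  let init := graph.foldl
    (fun (p : PySem.Dict Int (PySem.Set Int) × PySem.Dict Int Bool) kv =>
      if PySem.Dict.contains ann kv.1 then p
      else (PySem.Dict.insert p.1 kv.1 PySem.Set.empty, PySem.Dict.insert p.2 kv.1 false))
    (PySem.Dict.empty, PySem.Dict.empty)
  let fin := (PySem.Dict.keys init.2).foldl
    (fun (p : PySem.Dict Int (PySem.Set Int) × PySem.Dict Int Bool) node =>
      if PySem.Dict.getD p.2 node true then p
      else
        let r := bfsA g ann [node] p.2 PySem.Set.empty PySem.Set.empty
        (r.1.foldl (fun d u => PySem.Dict.insert d u r.2.1) p.1, r.2.2))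
    init
  PySem.Dict.items fin.1

-- ===== PORT B =====
def scanB (annotations : PySem.Dict Int Int) (nbrs : List Int)
    (acc : PySem.Set Int × List Int) : PySem.Set Int × List Int :=
  nbrs.foldl (fun p n =>
    match PySem.Dict.get? annotations n with
    | some v => (PySem.Set.add p.1 v, p.2)
    | none => (p.1, p.2 ++ [n])) acc

mutual
def dfsB (graph : PySem.Dict Int (List Int)) (annotations : PySem.Dict Int Int)
    (fuel : Nat) (node : Int) (seen : PySem.Dict Int Bool) (locN locA : PySem.Set Int) :
    PySem.Set Int × PySem.Set Int × PySem.Dict Int Bool :=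
  match fuel with
  | 0 => (locN, locA, seen)
  | fuel' + 1 =>
    let seen' := PySem.Dict.insert seen node true
    let sp := scanB annotations (PySem.Dict.getD graph node []) (locA, [])
    visitRevB graph annotations fuel' sp.2 seen' (PySem.Set.add locN node) sp.1
termination_by (fuel, 0)

def visitRevB (graph : PySem.Dict Int (List Int)) (annotations : PySem.Dict Int Int)
    (fuel : Nat) (pending : List Int) (seen : PySem.Dict Int Bool) (locN locA : PySem.Set Int) :
    PySem.Set Int × PySem.Set Int × PySem.Dict Int Bool :=
  match pending with
  | [] => (locN, locA, seen)
  | n :: rest =>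
    let r := visitRevB graph annotations fuel rest seen locN locA
    if PySem.Dict.getD r.2.2 n true then r
    else dfsB graph annotations fuel n r.2.2 r.1 r.2.1
termination_by (fuel, pending.length + 1)
decreasing_by
  · exact Prod.Lex.right _ (by simp)
  · exact Prod.Lex.right _ (by simp)
end

def propagate_alt (graph : List (Int × List Int)) (annotations : List (Int × Int)) : List (Int × List Int) :=
  let g : PySem.Dict Int (List Int) := PySem.Dict.mk graph
  let ann : PySem.Dict Int Int := PySem.Dict.mk annotations
  let init := graph.foldl
    (fun (p : PySem.Dict Int (PySem.Set Int) × PySem.Dict Int Bool) kv =>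
      if PySem.Dict.contains ann kv.1 then p
      else (PySem.Dict.insert p.1 kv.1 PySem.Set.empty, PySem.Dict.insert p.2 kv.1 false))
    (PySem.Dict.empty, PySem.Dict.empty)
  let fin := (PySem.Dict.keys init.2).foldl
    (fun (p : PySem.Dict Int (PySem.Set Int) × PySem.Dict Int Bool) node =>
      if PySem.Dict.getD p.2 node true then p
      else
        let r := dfsB g ann (PySem.Dict.size p.2 + 1) node p.2 PySem.Set.empty PySem.Set.empty
        (r.1.foldl (fun d u => PySem.Dict.insert d u r.2.1) p.1, r.2.2))
    init
  PySem.Dict.items fin.1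

-- ===== PRECONDITION & SPEC =====
-- Pre_ excludes exactly the inputs on which the Python A raises KeyError: an unannotated
-- graph key whose neighbor list contains an unannotated node that is not itself a graph key
-- (already_seen[neighbor] / graph[neighbor] would be missing).
def Pre_propagate (graph : List (Int × List Int)) (annotations : List (Int × Int)) : Prop :=
  ∀ p ∈ graph, PySem.Dict.contains (PySem.Dict.mk annotations) p.1 = false →
    ∀ n ∈ p.2, (PySem.Dict.contains (PySem.Dict.mk annotations) n
      || PySem.Dict.contains (PySem.Dict.mk graph) n) = true
instance (graph : List (Int × List Int)) (annotations : List (Int × Int)) : Decidable (Pre_propagate graph annotations) := by unfold Pre_propagate; infer_instance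

def pvWitness_propagate : (List (Int × List Int)) × (List (Int × Int)) :=
  ([(0, [1]), (1, [0, 2]), (2, [])], [(2, 5)])

def Spec_propagate (graph : List (Int × List Int)) (annotations : List (Int × Int)) (out : List (Int × List Int)) : Prop := out = propagate_alt graph annotations
instance (graph : List (Int × List Int)) (annotations : List (Int × Int)) (out : List (Int × List Int)) : Decidable (Spec_propagate graph annotations out) := by unfold Spec_propagate; infer_instance

-- ===== CLAIM (what is proved, stated in full; the proofs are below) =====
def Claim_equal_propagate : Prop := ∀ (graph : List (Int × List Int)) (annotations : List (Int × Int)), Dom_propagate graph annotations → Pre_propagate graph annotations → Spec_propagate graph annotations (propagate graph annotations)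

-- ===== LEMMAS AND PROOFS =====
theorem scan_fst_eq (ann : PySem.Dict Int Int) (seen : PySem.Dict Int Bool) (nbrs : List Int) :
    ∀ s lA lB, (scanA ann seen nbrs (s, lA)).1 = (scanB ann nbrs (s, lB)).1 := by
  induction nbrs with
  | nil => intro s lA lB; rfl
  | cons m rest ih =>
    intro s lA lB
    simp only [scanA, scanB, List.foldl_cons]
    cases hg : PySem.Dict.get? ann m with
    | some v => exact ih _ _ _
    | none =>
      by_cases hs : PySem.Dict.getD seen m true <;> (simp [hs]; exact ih _ _ _)

theorem scan_snd_filter (ann : PySem.Dict Int Int) (seen : PySem.Dict Int Bool) (nbrs : List Int) :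
    ∀ s lA lB, lA = lB.filter (fun n => !PySem.Dict.getD seen n true) →
    (scanA ann seen nbrs (s, lA)).2
      = ((scanB ann nbrs (s, lB)).2).filter (fun n => !PySem.Dict.getD seen n true) := by
  induction nbrs with
  | nil => intro s lA lB h; exact h
  | cons m rest ih =>
    intro s lA lB h
    simp only [scanA, scanB, List.foldl_cons]
    cases hg : PySem.Dict.get? ann m with
    | some v => exact ih _ _ _ h
    | none =>
      by_cases hs : PySem.Dict.getD seen m true
      · simp only [hs, if_true]
        exact ih _ _ _ (by rw [h, List.filter_append]; simp [hs])
      · simp only [hs]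
        exact ih _ _ _ (by rw [h, List.filter_append]; simp [hs])

theorem scanB_fst_mono (ann : PySem.Dict Int Int) (nbrs : List Int) :
    ∀ s l x, x ∈ s → x ∈ (scanB ann nbrs (s, l)).1 := by
  induction nbrs with
  | nil => intro s l x hx; exact hx
  | cons m rest ih =>
    intro s l x hx
    simp only [scanB, List.foldl_cons]
    cases hg : PySem.Dict.get? ann m with
    | some v => exact ih _ _ _ (by rw [PySem.Set.mem_add]; exact Or.inl hx)
    | none => exact ih _ _ _ hx

theorem scanB_snd_mem (ann : PySem.Dict Int Int) (nbrs : List Int) :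
    ∀ s l n, n ∈ (scanB ann nbrs (s, l)).2 →
      n ∈ l ∨ (PySem.Dict.get? ann n = none ∧ n ∈ nbrs) := by
  induction nbrs with
  | nil => intro s l n hn; exact Or.inl hn
  | cons m rest ih =>
    intro s l n hn
    simp only [scanB, List.foldl_cons] at hn
    cases hg : PySem.Dict.get? ann m with
    | some v =>
      rcases ih _ _ n (by simpa [hg] using hn) with h | h
      · exact Or.inl h
      · exact Or.inr ⟨h.1, List.mem_cons_of_mem _ h.2⟩
    | none =>
      rcases ih _ _ n (by simpa [hg] using hn) with h | h
      · rcases List.mem_append.mp h with h' | h'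
        · exact Or.inl h'
        · simp at h'; subst h'; exact Or.inr ⟨hg, List.mem_cons_self ..⟩
      · exact Or.inr ⟨h.1, List.mem_cons_of_mem _ h.2⟩

theorem scanB_fst_ann (ann : PySem.Dict Int Int) (nbrs : List Int) :
    ∀ s l n v, n ∈ nbrs → PySem.Dict.get? ann n = some v → v ∈ (scanB ann nbrs (s, l)).1 := by
  induction nbrs with
  | nil => intro s l n v hn; simp at hn
  | cons m rest ih =>
    intro s l n v hn hv
    simp only [scanB, List.foldl_cons]
    rcases List.mem_cons.mp hn with he | hm
    · subst he
      rw [hv]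
      exact scanB_fst_mono ann rest _ _ v (by rw [PySem.Set.mem_add]; exact Or.inr rfl)
    · cases hg : PySem.Dict.get? ann m with
      | some w => exact ih _ _ n v hm hv
      | none => exact ih _ _ n v hm hv

theorem scanB_fst_noop (ann : PySem.Dict Int Int) (nbrs : List Int) :
    ∀ s l, (∀ n ∈ nbrs, ∀ v, PySem.Dict.get? ann n = some v → v ∈ s) →
      (scanB ann nbrs (s, l)).1 = s := by
  induction nbrs with
  | nil => intro s l _; rfl
  | cons m rest ih =>
    intro s l hob
    simp only [scanB, List.foldl_cons]
    cases hg : PySem.Dict.get? ann m with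
    | some v =>
      show (scanB ann rest (PySem.Set.add s v, l)).1 = s
      rw [PySem.Set.add_of_mem (hob m (List.mem_cons_self ..) v hg)]
      exact ih _ _ (fun n hn => hob n (List.mem_cons_of_mem _ hn))
    | none => exact ih _ _ (fun n hn => hob n (List.mem_cons_of_mem _ hn))

theorem scanB_snd_acc_mono (ann : PySem.Dict Int Int) (nbrs : List Int) :
    ∀ s l x, x ∈ l → x ∈ (scanB ann nbrs (s, l)).2 := by
  induction nbrs with
  | nil => intro s l x hx; exact hx
  | cons m rest ih =>
    intro s l x hx
    simp only [scanB, List.foldl_cons]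
    cases hg : PySem.Dict.get? ann m with
    | some v => exact ih _ _ _ hx
    | none => exact ih _ _ _ (List.mem_append_left _ hx)

theorem scanB_snd_complete (ann : PySem.Dict Int Int) (nbrs : List Int) :
    ∀ s l n, n ∈ nbrs → PySem.Dict.get? ann n = none → n ∈ (scanB ann nbrs (s, l)).2 := by
  induction nbrs with
  | nil => intro s l n hn; simp at hn
  | cons m rest ih =>
    intro s l n hn hun
    simp only [scanB, List.foldl_cons]
    rcases List.mem_cons.mp hn with he | hm
    · subst he
      rw [hun]
      exact scanB_snd_acc_mono ann rest _ _ n (List.mem_append_right _ (List.mem_singleton.mpr rfl))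
    · cases hg : PySem.Dict.get? ann m with
      | some w => exact ih _ _ n hm hun
      | none => exact ih _ _ n hm hun

theorem getD_true_mono (d d' : PySem.Dict Int Bool)
    (hk : PySem.Dict.keys d' = PySem.Dict.keys d)
    (hm : ∀ x, PySem.Dict.get? d x = some true → PySem.Dict.get? d' x = some true)
    (n : Int) (h : PySem.Dict.getD d n true = true) : PySem.Dict.getD d' n true = true := by
  cases hg : PySem.Dict.get? d n with
  | none =>
    have hnk : n ∉ PySem.Dict.keys d := (PySem.Dict.get?_eq_none_iff_not_mem_keys d n).mp hg
    have : PySem.Dict.get? d' n = none := (PySem.Dict.get?_eq_none_iff_not_mem_keys d' n).mpr (hk ▸ hnk)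
    rw [PySem.Dict.getD_eq_get?_getD, this]; rfl
  | some b =>
    have hb : b = true := by
      rw [PySem.Dict.getD_eq_get?_getD, hg] at h; simpa using h
    subst hb
    rw [PySem.Dict.getD_eq_get?_getD, hm n hg]; rfl

def OB (g : PySem.Dict Int (List Int)) (a : PySem.Dict Int Int) (x : Int)
    (r : PySem.Set Int × PySem.Set Int × PySem.Dict Int Bool) : Prop :=
  x ∈ r.1 ∧ ∀ n ∈ PySem.Dict.getD g x [],
    (∀ v, PySem.Dict.get? a n = some v → v ∈ r.2.1) ∧
    (PySem.Dict.get? a n = none → PySem.Dict.getD r.2.2 n true = true)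

def AF (g : PySem.Dict Int (List Int)) (a : PySem.Dict Int Int)
    (stack : List Int) (seen : PySem.Dict Int Bool) (locN locA : PySem.Set Int) : Prop :=
  PySem.Dict.keys (bfsA g a stack seen locN locA).2.2 = PySem.Dict.keys seen ∧
  (∀ x, PySem.Dict.get? seen x = some true →
    PySem.Dict.get? (bfsA g a stack seen locN locA).2.2 x = some true) ∧
  falseCnt (bfsA g a stack seen locN locA).2.2 ≤ falseCnt seen ∧
  (∀ x ∈ locN, x ∈ (bfsA g a stack seen locN locA).1) ∧
  (∀ x ∈ locA, x ∈ (bfsA g a stack seen locN locA).2.1) ∧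
  (∀ y ∈ stack, PySem.Dict.get? (bfsA g a stack seen locN locA).2.2 y = some true) ∧
  (∀ x, PySem.Dict.get? (bfsA g a stack seen locN locA).2.2 x = some true →
    PySem.Dict.get? seen x = some true ∨ OB g a x (bfsA g a stack seen locN locA))

theorem bfsA_step (g : PySem.Dict Int (List Int)) (a : PySem.Dict Int Int)
    (stack : List Int) (seen : PySem.Dict Int Bool) (locN locA : PySem.Set Int)
    (hs : stack ≠ []) :
    bfsA g a stack seen locN locA
      = bfsA g a
          (stack.dropLast ++ (scanA a (PySem.Dict.insert seen (stack.getLast hs) true)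
            (PySem.Dict.getD g (stack.getLast hs) []) (locA, [])).2)
          (PySem.Dict.insert seen (stack.getLast hs) true)
          (PySem.Set.add locN (stack.getLast hs))
          (scanA a (PySem.Dict.insert seen (stack.getLast hs) true)
            (PySem.Dict.getD g (stack.getLast hs) []) (locA, [])).1 := by
  conv_lhs => rw [bfsA]
  simp only [dif_neg hs]

theorem bfsA_facts (g : PySem.Dict Int (List Int)) (a : PySem.Dict Int Int)
    (stack : List Int) (seen : PySem.Dict Int Bool) (locN locA : PySem.Set Int)
    (hK : ∀ x ∈ stack, (PySem.Dict.get? seen x).isSome) :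
    AF g a stack seen locN locA := by
  by_cases hs : stack = []
  · subst hs
    unfold AF
    rw [bfsA]
    exact ⟨rfl, fun x h => h, le_refl _, fun x h => h, fun x h => h, by simp,
      fun x h => Or.inl h⟩
  · have hcurmem : stack.getLast hs ∈ stack := List.getLast_mem hs
    have hcontains : PySem.Dict.contains seen (stack.getLast hs) = true := by
      rw [PySem.Dict.contains_eq_isSome_get?]; exact hK _ hcurmem
    have hpushF : ∀ n ∈ (scanA a (PySem.Dict.insert seen (stack.getLast hs) true)
        (PySem.Dict.getD g (stack.getLast hs) []) (locA, [])).2,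
        PySem.Dict.getD (PySem.Dict.insert seen (stack.getLast hs) true) n true = false := by
      intro n hn
      rcases scanA_push_mem _ _ _ _ n hn with h' | h'
      · simp at h'
      · exact h'
    have hK' : ∀ x ∈ stack.dropLast ++ (scanA a (PySem.Dict.insert seen (stack.getLast hs) true)
        (PySem.Dict.getD g (stack.getLast hs) []) (locA, [])).2,
        (PySem.Dict.get? (PySem.Dict.insert seen (stack.getLast hs) true) x).isSome := by
      intro x hx
      rcases List.mem_append.mp hx with hx | hx
      · have hxs : x ∈ stack := List.mem_of_mem_dropLast hx
        rw [← PySem.Dict.contains_eq_isSome_get?, PySem.Dict.contains_insert]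
        have hcx : PySem.Dict.contains seen x = true := by
          rw [PySem.Dict.contains_eq_isSome_get?]; exact hK _ hxs
        rw [hcx, Bool.or_true]
      · have := get?_false_of_getD_false _ _ (hpushF x hx)
        rw [this]; rfl
    have IH := bfsA_facts g a
      (stack.dropLast ++ (scanA a (PySem.Dict.insert seen (stack.getLast hs) true)
        (PySem.Dict.getD g (stack.getLast hs) []) (locA, [])).2)
      (PySem.Dict.insert seen (stack.getLast hs) true)
      (PySem.Set.add locN (stack.getLast hs))
      (scanA a (PySem.Dict.insert seen (stack.getLast hs) true)
        (PySem.Dict.getD g (stack.getLast hs) []) (locA, [])).1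
      hK'
    unfold AF at IH ⊢
    rw [bfsA_step g a stack seen locN locA hs]
    obtain ⟨F1, F2, F3, F4N, F4A, F5, F6⟩ := IH
    have hkeys' : PySem.Dict.keys (PySem.Dict.insert seen (stack.getLast hs) true)
        = PySem.Dict.keys seen := PySem.Dict.keys_insert_of_contains seen true hcontains
    have hmono' : ∀ x, PySem.Dict.get? seen x = some true →
        PySem.Dict.get? (PySem.Dict.insert seen (stack.getLast hs) true) x = some true := by
      intro x hx
      rw [PySem.Dict.get?_insert]
      split
      · rfl
      · exact hx
    refine ⟨?_, ?_, ?_, ?_, ?_, ?_, ?_⟩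
    · rw [F1, hkeys']
    · intro x hx; exact F2 x (hmono' x hx)
    · exact le_trans F3 (falseCnt_insert_le _ _)
    · intro x hx
      exact F4N x (by rw [PySem.Set.mem_add]; exact Or.inl hx)
    · intro x hx
      refine F4A x ?_
      rw [scan_fst_eq a _ _ locA [] []]
      exact scanB_fst_mono _ _ _ _ _ hx
    · intro y hy
      have hsplit : stack = stack.dropLast ++ [stack.getLast hs] :=
        (List.dropLast_append_getLast hs).symm
      rw [hsplit] at hy
      rcases List.mem_append.mp hy with hy | hy
      · exact F5 y (List.mem_append_left _ hy)
      · have : y = stack.getLast hs := List.mem_singleton.mp hy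
        subst this
        exact F2 _ (PySem.Dict.get?_insert_self _ _ _)
    · intro x hx
      rcases F6 x hx with htrue | hob
      · rw [PySem.Dict.get?_insert] at htrue
        by_cases hxc : x = stack.getLast hs
        · subst hxc
          right
          constructor
          · exact F4N _ (by rw [PySem.Set.mem_add]; exact Or.inr rfl)
          · intro n hn
            constructor
            · intro v hv
              refine F4A v ?_
              rw [scan_fst_eq a _ _ locA [] []]
              exact scanB_fst_ann _ _ _ _ n v hn hv
            · intro hnone
              by_cases hd : PySem.Dict.getD (PySem.Dict.insert seen (stack.getLast hs) true) n true
              · exact getD_true_mono _ _ F1 F2 n hd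
              · have hnB : n ∈ (scanB a (PySem.Dict.getD g (stack.getLast hs) []) (locA, [])).2 :=
                  scanB_snd_complete _ _ _ _ n hn hnone
                have hnA : n ∈ (scanA a (PySem.Dict.insert seen (stack.getLast hs) true)
                    (PySem.Dict.getD g (stack.getLast hs) []) (locA, [])).2 := by
                  rw [scan_snd_filter a _ _ locA [] [] rfl]
                  rw [List.mem_filter]
                  exact ⟨hnB, by rw [Bool.not_eq_true] at hd; rw [hd]; rfl⟩
                have := F5 n (List.mem_append_right _ hnA)
                rw [PySem.Dict.getD_eq_get?_getD, this]; rfl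
        · rw [if_neg hxc] at htrue
          exact Or.inl htrue
      · exact Or.inr hob
termination_by (falseCnt seen, trueCnt stack seen)
decreasing_by
  exact step_dec a (PySem.Dict.getD g (stack.getLast hs) []) stack seen locA hs

theorem bfsA_append (g : PySem.Dict Int (List Int)) (a : PySem.Dict Int Int)
    (S T : List Int) (seen : PySem.Dict Int Bool) (locN locA : PySem.Set Int) :
    bfsA g a (T ++ S) seen locN locA
      = bfsA g a T (bfsA g a S seen locN locA).2.2
          (bfsA g a S seen locN locA).1 (bfsA g a S seen locN locA).2.1 := by
  by_cases hs : S = []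
  · subst hs
    have h0 : bfsA g a [] seen locN locA = (locN, locA, seen) := by
      rw [bfsA]; simp
    rw [List.append_nil, h0]
  · have hts : T ++ S ≠ [] := by simp [hs]
    have e1 : (T ++ S).getLast hts = S.getLast hs := List.getLast_append_of_ne_nil hts hs
    have e2 : (T ++ S).dropLast = T ++ S.dropLast := List.dropLast_append_of_ne_nil hs
    rw [bfsA_step g a (T ++ S) seen locN locA hts, e1, e2, List.append_assoc]
    rw [bfsA_append g a
      (S.dropLast ++ (scanA a (PySem.Dict.insert seen (S.getLast hs) true)
        (PySem.Dict.getD g (S.getLast hs) []) (locA, [])).2) T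
      (PySem.Dict.insert seen (S.getLast hs) true)
      (PySem.Set.add locN (S.getLast hs))
      (scanA a (PySem.Dict.insert seen (S.getLast hs) true)
        (PySem.Dict.getD g (S.getLast hs) []) (locA, [])).1]
    rw [← bfsA_step g a S seen locN locA hs]
termination_by (falseCnt seen, trueCnt S seen)
decreasing_by
  exact step_dec a (PySem.Dict.getD g (S.getLast hs) []) S seen locA hs

theorem dfsB_zero (g : PySem.Dict Int (List Int)) (a : PySem.Dict Int Int)
    (node : Int) (seen : PySem.Dict Int Bool) (locN locA : PySem.Set Int) :
    dfsB g a 0 node seen locN locA = (locN, locA, seen) := by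
  rw [dfsB]

theorem dfsB_succ (g : PySem.Dict Int (List Int)) (a : PySem.Dict Int Int)
    (m : Nat) (node : Int) (seen : PySem.Dict Int Bool) (locN locA : PySem.Set Int) :
    dfsB g a (m + 1) node seen locN locA
      = visitRevB g a m (scanB a (PySem.Dict.getD g node []) (locA, [])).2
          (PySem.Dict.insert seen node true) (PySem.Set.add locN node)
          (scanB a (PySem.Dict.getD g node []) (locA, [])).1 := by
  rw [dfsB]

theorem visitRevB_nil (g : PySem.Dict Int (List Int)) (a : PySem.Dict Int Int)
    (fuel : Nat) (seen : PySem.Dict Int Bool) (locN locA : PySem.Set Int) :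
    visitRevB g a fuel [] seen locN locA = (locN, locA, seen) := by
  rw [visitRevB]

theorem visitRevB_cons (g : PySem.Dict Int (List Int)) (a : PySem.Dict Int Int)
    (fuel : Nat) (n : Int) (rest : List Int) (seen : PySem.Dict Int Bool)
    (locN locA : PySem.Set Int) :
    visitRevB g a fuel (n :: rest) seen locN locA
      = if PySem.Dict.getD (visitRevB g a fuel rest seen locN locA).2.2 n true then
          visitRevB g a fuel rest seen locN locA
        else dfsB g a fuel n (visitRevB g a fuel rest seen locN locA).2.2
          (visitRevB g a fuel rest seen locN locA).1
          (visitRevB g a fuel rest seen locN locA).2.1 := by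
  rw [visitRevB]

theorem getD_insert_true_mono (d : PySem.Dict Int Bool) (k x : Int)
    (h : PySem.Dict.getD d x true = true) :
    PySem.Dict.getD (PySem.Dict.insert d k true) x true = true := by
  rw [PySem.Dict.getD_insert]
  split
  · rfl
  · exact h

theorem B_mono (g : PySem.Dict Int (List Int)) (a : PySem.Dict Int Int) : ∀ fuel : Nat,
    (∀ node seen locN locA x, PySem.Dict.getD seen x true = true →
      PySem.Dict.getD (dfsB g a fuel node seen locN locA).2.2 x true = true)
    ∧ (∀ pending seen locN locA x, PySem.Dict.getD seen x true = true →
      PySem.Dict.getD (visitRevB g a fuel pending seen locN locA).2.2 x true = true) := by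
  intro fuel
  induction fuel with
  | zero =>
    have hD : ∀ node seen locN locA x, PySem.Dict.getD seen x true = true →
        PySem.Dict.getD (dfsB g a 0 node seen locN locA).2.2 x true = true := by
      intro node seen locN locA x hx
      rw [dfsB_zero]
      exact hx
    refine ⟨hD, ?_⟩
    intro pending
    induction pending with
    | nil =>
      intro seen locN locA x hx
      rw [visitRevB_nil]
      exact hx
    | cons n rest ih =>
      intro seen locN locA x hx
      rw [visitRevB_cons]
      split
      · exact ih seen locN locA x hx
      · exact hD _ _ _ _ x (ih seen locN locA x hx)
  | succ m ihm =>
    have hD : ∀ node seen locN locA x, PySem.Dict.getD seen x true = true →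
        PySem.Dict.getD (dfsB g a (m + 1) node seen locN locA).2.2 x true = true := by
      intro node seen locN locA x hx
      rw [dfsB_succ]
      exact ihm.2 _ _ _ _ x (getD_insert_true_mono _ _ _ hx)
    refine ⟨hD, ?_⟩
    intro pending
    induction pending with
    | nil =>
      intro seen locN locA x hx
      rw [visitRevB_nil]
      exact hx
    | cons n rest ih =>
      intro seen locN locA x hx
      rw [visitRevB_cons]
      split
      · exact ih seen locN locA x hx
      · exact hD _ _ _ _ x (ih seen locN locA x hx)

theorem visitRevB_filter (g : PySem.Dict Int (List Int)) (a : PySem.Dict Int Int)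
    (fuel : Nat) (st0 : PySem.Dict Int Bool) : ∀ pending (seen : PySem.Dict Int Bool)
    (locN locA : PySem.Set Int),
    (∀ n, PySem.Dict.getD st0 n true = true → PySem.Dict.getD seen n true = true) →
    visitRevB g a fuel (pending.filter (fun n => !PySem.Dict.getD st0 n true)) seen locN locA
      = visitRevB g a fuel pending seen locN locA := by
  intro pending
  induction pending with
  | nil => intro seen locN locA _; rfl
  | cons n rest ih =>
    intro seen locN locA hmono
    by_cases hn : PySem.Dict.getD st0 n true
    · rw [List.filter_cons_of_neg (by simp [hn])]
      rw [ih seen locN locA hmono, visitRevB_cons]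
      have : PySem.Dict.getD (visitRevB g a fuel rest seen locN locA).2.2 n true = true :=
        (B_mono g a fuel).2 rest seen locN locA n (hmono n hn)
      rw [this]
      simp
    · rw [List.filter_cons_of_pos (by simp [hn])]
      rw [visitRevB_cons, visitRevB_cons, ih seen locN locA hmono]

theorem insert_true_self (d : PySem.Dict Int Bool) (k : Int)
    (hnd : (PySem.Dict.keys d).Nodup) (h : PySem.Dict.get? d k = some true) :
    PySem.Dict.insert d k true = d := by
  apply PySem.Dict.ext
  rw [PySem.Dict.items_insert, if_pos (by rw [PySem.Dict.contains_eq_isSome_get?, h]; rfl)]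
  have : ∀ p ∈ PySem.Dict.items d, (if p.1 == k then (k, true) else p) = p := by
    intro p hp
    by_cases hpk : p.1 = k
    · have : PySem.Dict.get? d p.1 = some p.2 :=
        PySem.Dict.get?_of_mem_items d (by simpa using hp) hnd
      rw [hpk] at this
      rw [this] at h
      have hp2 : p.2 = true := by injection h with h'
      simp only [hpk, BEq.rfl, if_true]
      exact (Prod.ext hpk hp2).symm
    · simp [hpk]
  rw [List.map_congr_left this]
  simp

theorem isSome_get?_iff_mem_keys (d : PySem.Dict Int Bool) (x : Int) :
    (PySem.Dict.get? d x).isSome = true ↔ x ∈ PySem.Dict.keys d := by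
  cases hg : PySem.Dict.get? d x with
  | none => simpa using (PySem.Dict.get?_eq_none_iff_not_mem_keys d x).mp hg
  | some b =>
    simp only [Option.isSome_some, true_iff]
    by_contra hnk
    rw [(PySem.Dict.get?_eq_none_iff_not_mem_keys d x).mpr hnk] at hg
    cases hg

theorem trueCnt_cons_le (x : Int) (xs : List Int) (seen : PySem.Dict Int Bool) :
    trueCnt xs seen ≤ trueCnt (x :: xs) seen := by
  unfold trueCnt
  rw [List.filter_cons]
  split <;> simp

theorem bfs_eq_dfs (g : PySem.Dict Int (List Int)) (a : PySem.Dict Int Int)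
    (fuel : Nat) (S : List Int) (seen : PySem.Dict Int Bool) (locN locA : PySem.Set Int)
    (hnd : (PySem.Dict.keys seen).Nodup)
    (hK : ∀ x ∈ S, (PySem.Dict.get? seen x).isSome)
    (hU : ∀ x ∈ S, PySem.Dict.get? seen x ≠ some true)
    (hf : falseCnt seen < fuel) :
    bfsA g a S seen locN locA = visitRevB g a fuel S seen locN locA := by
  match S with
  | [] =>
    rw [visitRevB_nil, bfsA]
    simp
  | x :: xs =>
    have hKxs : ∀ y ∈ xs, (PySem.Dict.get? seen y).isSome :=
      fun y hy => hK y (List.mem_cons_of_mem _ hy)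
    have hUxs : ∀ y ∈ xs, PySem.Dict.get? seen y ≠ some true :=
      fun y hy => hU y (List.mem_cons_of_mem _ hy)
    have hE1 : bfsA g a xs seen locN locA = visitRevB g a fuel xs seen locN locA :=
      bfs_eq_dfs g a fuel xs seen locN locA hnd hKxs hUxs hf
    have hF := bfsA_facts g a xs seen locN locA hKxs
    obtain ⟨F1, F2, F3, F4N, F4A, F5, F6⟩ := hF
    have hstep : bfsA g a (x :: xs) seen locN locA
        = bfsA g a [x] (bfsA g a xs seen locN locA).2.2
            (bfsA g a xs seen locN locA).1 (bfsA g a xs seen locN locA).2.1 := by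
      have := bfsA_append g a xs [x] seen locN locA
      simpa using this
    have hnd1 : (PySem.Dict.keys (bfsA g a xs seen locN locA).2.2).Nodup := by
      rw [F1]; exact hnd
    have hkx : (PySem.Dict.get? (bfsA g a xs seen locN locA).2.2 x).isSome := by
      rw [isSome_get?_iff_mem_keys, F1, ← isSome_get?_iff_mem_keys]
      exact hK x (List.mem_cons_self ..)
    rw [hstep, visitRevB_cons, ← hE1]
    by_cases hxseen : PySem.Dict.getD (bfsA g a xs seen locN locA).2.2 x true
    · -- x was seen while processing xs: the A-step is a no-op
      have hsome : PySem.Dict.get? (bfsA g a xs seen locN locA).2.2 x = some true := by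
        cases hg : PySem.Dict.get? (bfsA g a xs seen locN locA).2.2 x with
        | none => rw [hg] at hkx; cases hkx
        | some b =>
          rw [PySem.Dict.getD_eq_get?_getD, hg] at hxseen
          simpa using congrArg (fun z => some z) hxseen
      rcases F6 x hsome with habs | hob
      · exact absurd habs (hU x (List.mem_cons_self ..))
      · rw [if_pos hxseen]
        have hins : PySem.Dict.insert (bfsA g a xs seen locN locA).2.2 x true
            = (bfsA g a xs seen locN locA).2.2 := insert_true_self _ _ hnd1 hsome
        have hx1 : ([x] : List Int).getLast (by simp) = x := by simp
        have hdrop : ([x] : List Int).dropLast = [] := rfl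
        rw [bfsA_step g a [x] _ _ _ (by simp)]
        simp only [hx1, hdrop, List.nil_append, hins]
        have hsp1 : (scanA a (bfsA g a xs seen locN locA).2.2
            (PySem.Dict.getD g x []) ((bfsA g a xs seen locN locA).2.1, [])).1
            = (bfsA g a xs seen locN locA).2.1 := by
          rw [scan_fst_eq a _ _ _ [] []]
          exact scanB_fst_noop a _ _ _ (fun n hn v hv => (hob.2 n hn).1 v hv)
        have hsp2 : (scanA a (bfsA g a xs seen locN locA).2.2
            (PySem.Dict.getD g x []) ((bfsA g a xs seen locN locA).2.1, [])).2 = [] := by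
          rw [scan_snd_filter a _ _ _ [] [] rfl]
          rw [List.filter_eq_nil_iff]
          intro n hn
          rcases scanB_snd_mem a _ _ [] n hn with h' | h'
          · simp at h'
          · have := (hob.2 n h'.2).2 h'.1
            simp [this]
        rw [PySem.Set.add_of_mem hob.1, hsp1, hsp2]
        rw [bfsA]
        simp
    · -- x still unseen: both sides descend into x
      have hfalse : PySem.Dict.getD (bfsA g a xs seen locN locA).2.2 x true = false := by
        simpa using hxseen
      rw [if_neg (by simp [hfalse])]
      obtain ⟨m, rfl⟩ : ∃ m, fuel = m + 1 := ⟨fuel - 1, by omega⟩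
      rw [dfsB_succ]
      have hx1 : ([x] : List Int).getLast (by simp) = x := by simp
      have hdrop : ([x] : List Int).dropLast = [] := rfl
      rw [bfsA_step g a [x] _ _ _ (by simp)]
      simp only [hx1, hdrop, List.nil_append]
      have hcont1 : PySem.Dict.contains (bfsA g a xs seen locN locA).2.2 x = true := by
        rw [PySem.Dict.contains_eq_isSome_get?]; exact hkx
      have hkeys2 : PySem.Dict.keys (PySem.Dict.insert (bfsA g a xs seen locN locA).2.2 x true)
          = PySem.Dict.keys (bfsA g a xs seen locN locA).2.2 :=
        PySem.Dict.keys_insert_of_contains _ true hcont1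
      have hsp1 : (scanA a (PySem.Dict.insert (bfsA g a xs seen locN locA).2.2 x true)
          (PySem.Dict.getD g x []) ((bfsA g a xs seen locN locA).2.1, [])).1
          = (scanB a (PySem.Dict.getD g x []) ((bfsA g a xs seen locN locA).2.1, [])).1 :=
        scan_fst_eq a _ _ _ [] []
      have hsp2 : (scanA a (PySem.Dict.insert (bfsA g a xs seen locN locA).2.2 x true)
          (PySem.Dict.getD g x []) ((bfsA g a xs seen locN locA).2.1, [])).2
          = (scanB a (PySem.Dict.getD g x []) ((bfsA g a xs seen locN locA).2.1, [])).2.filter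
            (fun n => !PySem.Dict.getD
              (PySem.Dict.insert (bfsA g a xs seen locN locA).2.2 x true) n true) :=
        scan_snd_filter a _ _ _ [] [] rfl
      have hfuel2 : falseCnt (PySem.Dict.insert (bfsA g a xs seen locN locA).2.2 x true) < m := by
        have h1 := falseCnt_insert_lt _ x hfalse
        omega
      have hrec : bfsA g a
          ((scanA a (PySem.Dict.insert (bfsA g a xs seen locN locA).2.2 x true)
            (PySem.Dict.getD g x []) ((bfsA g a xs seen locN locA).2.1, [])).2)
          (PySem.Dict.insert (bfsA g a xs seen locN locA).2.2 x true)
          (PySem.Set.add (bfsA g a xs seen locN locA).1 x)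
          ((scanA a (PySem.Dict.insert (bfsA g a xs seen locN locA).2.2 x true)
            (PySem.Dict.getD g x []) ((bfsA g a xs seen locN locA).2.1, [])).1)
          = visitRevB g a m
            ((scanA a (PySem.Dict.insert (bfsA g a xs seen locN locA).2.2 x true)
              (PySem.Dict.getD g x []) ((bfsA g a xs seen locN locA).2.1, [])).2)
            (PySem.Dict.insert (bfsA g a xs seen locN locA).2.2 x true)
            (PySem.Set.add (bfsA g a xs seen locN locA).1 x)
            ((scanA a (PySem.Dict.insert (bfsA g a xs seen locN locA).2.2 x true)
              (PySem.Dict.getD g x []) ((bfsA g a xs seen locN locA).2.1, [])).1) := by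
        apply bfs_eq_dfs
        · rw [hkeys2]; exact hnd1
        · intro y hy
          have hyF : PySem.Dict.getD
              (PySem.Dict.insert (bfsA g a xs seen locN locA).2.2 x true) y true = false := by
            rcases scanA_push_mem _ _ _ _ y hy with h' | h'
            · simp at h'
            · exact h'
          rw [get?_false_of_getD_false _ _ hyF]; rfl
        · intro y hy
          have hyF : PySem.Dict.getD
              (PySem.Dict.insert (bfsA g a xs seen locN locA).2.2 x true) y true = false := by
            rcases scanA_push_mem _ _ _ _ y hy with h' | h'
            · simp at h'
            · exact h'
          rw [get?_false_of_getD_false _ _ hyF]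
          simp
        · exact hfuel2
      rw [hrec, hsp1, hsp2]
      rw [visitRevB_filter g a m _ _ _ _ _ (fun n hn => hn)]
termination_by (falseCnt seen, trueCnt S seen, S.length)
decreasing_by
  · have hle := trueCnt_cons_le x xs seen
    rcases Nat.lt_or_ge (trueCnt xs seen) (trueCnt (x :: xs) seen) with hlt | hge
    · exact Prod.Lex.right _ (Prod.Lex.left _ _ hlt)
    · have heq : trueCnt xs seen = trueCnt (x :: xs) seen := le_antisymm hle hge
      rw [heq]
      exact Prod.Lex.right _ (Prod.Lex.right _ (by simp))
  · have h1 := falseCnt_insert_lt (bfsA g a xs seen locN locA).2.2 x hfalse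
    exact Prod.Lex.left _ _ (by omega)

theorem falseCnt_le_size (d : PySem.Dict Int Bool) : falseCnt d ≤ PySem.Dict.size d := by
  unfold falseCnt
  have := List.length_filter_le (fun (p : Int × Bool) => p.2 == false) (PySem.Dict.items d)
  simpa [PySem.Dict.size] using this

theorem outer_eq (g : PySem.Dict Int (List Int)) (a : PySem.Dict Int Int) :
    ∀ (ks : List Int) (p : PySem.Dict Int (PySem.Set Int) × PySem.Dict Int Bool),
    (PySem.Dict.keys p.2).Nodup →
    (∀ k ∈ ks, k ∈ PySem.Dict.keys p.2) →
    ks.foldl (fun (p : PySem.Dict Int (PySem.Set Int) × PySem.Dict Int Bool) node =>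
      if PySem.Dict.getD p.2 node true then p
      else
        let r := bfsA g a [node] p.2 PySem.Set.empty PySem.Set.empty
        (r.1.foldl (fun d u => PySem.Dict.insert d u r.2.1) p.1, r.2.2)) p
    = ks.foldl (fun (p : PySem.Dict Int (PySem.Set Int) × PySem.Dict Int Bool) node =>
      if PySem.Dict.getD p.2 node true then p
      else
        let r := dfsB g a (PySem.Dict.size p.2 + 1) node p.2 PySem.Set.empty PySem.Set.empty
        (r.1.foldl (fun d u => PySem.Dict.insert d u r.2.1) p.1, r.2.2)) p := by
  intro ks
  induction ks with
  | nil => intro p _ _; rfl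
  | cons k rest ih =>
    intro p hnd hmem
    simp only [List.foldl_cons]
    by_cases hk : PySem.Dict.getD p.2 k true
    · rw [if_pos hk, if_pos hk]
      exact ih p hnd (fun y hy => hmem y (List.mem_cons_of_mem _ hy))
    · have hfalse : PySem.Dict.getD p.2 k true = false := by simpa using hk
      have hKk : ∀ x ∈ [k], (PySem.Dict.get? p.2 x).isSome := by
        intro x hx
        rw [List.mem_singleton.mp hx]
        rw [get?_false_of_getD_false _ _ hfalse]; rfl
      have hUk : ∀ x ∈ [k], PySem.Dict.get? p.2 x ≠ some true := by
        intro x hx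
        rw [List.mem_singleton.mp hx, get?_false_of_getD_false _ _ hfalse]
        simp
      have hfuel : falseCnt p.2 < PySem.Dict.size p.2 + 1 := by
        have := falseCnt_le_size p.2; omega
      have hE := bfs_eq_dfs g a (PySem.Dict.size p.2 + 1) [k] p.2
        PySem.Set.empty PySem.Set.empty hnd hKk hUk hfuel
      rw [visitRevB_cons, visitRevB_nil] at hE
      simp only [hfalse, Bool.false_eq_true, if_false] at hE
      rw [if_neg (by simp [hfalse]), if_neg (by simp [hfalse])]
      simp only [← hE]
      -- state invariant for the tail
      have hFk := bfsA_facts g a [k] p.2 PySem.Set.empty PySem.Set.empty hKk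
      have hkeep : PySem.Dict.keys (bfsA g a [k] p.2 PySem.Set.empty PySem.Set.empty).2.2
          = PySem.Dict.keys p.2 := hFk.1
      exact ih _ (by rw [hkeep]; exact hnd)
        (fun y hy => by rw [hkeep]; exact hmem y (List.mem_cons_of_mem _ hy))

theorem phase1_nodup (ann : PySem.Dict Int Int) :
    ∀ (graph : List (Int × List Int)) (p : PySem.Dict Int (PySem.Set Int) × PySem.Dict Int Bool),
    (PySem.Dict.keys p.2).Nodup →
    (PySem.Dict.keys (graph.foldl
      (fun (p : PySem.Dict Int (PySem.Set Int) × PySem.Dict Int Bool) kv =>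
        if PySem.Dict.contains ann kv.1 then p
        else (PySem.Dict.insert p.1 kv.1 PySem.Set.empty, PySem.Dict.insert p.2 kv.1 false))
      p).2).Nodup := by
  intro graph
  induction graph with
  | nil => intro p h; exact h
  | cons kv rest ih =>
    intro p h
    simp only [List.foldl_cons]
    by_cases hc : PySem.Dict.contains ann kv.1
    · rw [if_pos hc]; exact ih p h
    · rw [if_neg hc]
      exact ih _ (PySem.Dict.nodup_keys_insert _ _ _ h)

theorem propagate_eq_alt (graph : List (Int × List Int)) (annotations : List (Int × Int)) :
    propagate graph annotations = propagate_alt graph annotations := by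
  unfold propagate propagate_alt
  apply congrArg (fun (d : PySem.Dict Int (PySem.Set Int)) => PySem.Dict.items d)
  apply congrArg Prod.fst
  apply outer_eq
  · apply phase1_nodup
    simp [PySem.Dict.keys_empty]
  · intro k hk; exact hk

-- ===== VERDICT (by name: the statement is the Claim_ definition above) =====
theorem propagate_spec : Claim_equal_propagate := by
  intro graph annotations _ _
  unfold Spec_propagate
  exact propagate_eq_alt graph annotations
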